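-- pv_equiv track=rewrite | github.com/miskaKos/2023 | project_2 _oprava.py | vyhodnot_zadane_cislo
-- ===== SOURCE A (Python) =====
-- def vyhodnot_zadane_cislo(zadane_cislo):
--     stejne_cisla = False
--     if not zadane_cislo.isnumeric():
--         Pokračuj = True
--         Text = "Once more"
--         return  Pokračuj, Text
--     elif len(zadane_cislo) != 4:
--         Pokračuj = True
--         Text = "Number has wrong length"
--         return  Pokračuj, Text
--     elif zadane_cislo[0] == "0":
--         Pokračuj = True
--         Text = "First number has not be 0."
--         return  Pokračuj, Text
--     for i in range(len(zadane_cislo)):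
--         for j in range (i+1,len(zadane_cislo)):
--             if zadane_cislo[i] == zadane_cislo[j]:
--                 stejne_cisla = True
--                 Pokračuj = True
--                 Text = "Same numbers"
--                 return  Pokračuj, Text
--     if stejne_cisla == False:
--         Pokračuj = False
--         Text = ""
--         return  Pokračuj, Text
-- ===== SOURCE B (Python) =====
-- def vyhodnot_zadane_cislo(zadane_cislo):
--     if not zadane_cislo.isnumeric():
--         return True, "Once more"
--     if len(zadane_cislo) != 4:
--         return True, "Number has wrong length"
--     if zadane_cislo[0] == "0":
--         return True, "First number has not be 0."
--     seen = set()
--     for ch in zadane_cislo: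
--         if ch in seen:
--             return True, "Same numbers"
--         seen.add(ch)
--     return False, ""
-- ===== Notes on version B (the rewrite author's own statement) =====
-- stated objective: idiomatic
-- what changed: The O(n^2) nested index loops over all pairs are replaced by a single pass over the characters that maintains a set of already-visited characters and returns on the first repeat.
import Mathlib
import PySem

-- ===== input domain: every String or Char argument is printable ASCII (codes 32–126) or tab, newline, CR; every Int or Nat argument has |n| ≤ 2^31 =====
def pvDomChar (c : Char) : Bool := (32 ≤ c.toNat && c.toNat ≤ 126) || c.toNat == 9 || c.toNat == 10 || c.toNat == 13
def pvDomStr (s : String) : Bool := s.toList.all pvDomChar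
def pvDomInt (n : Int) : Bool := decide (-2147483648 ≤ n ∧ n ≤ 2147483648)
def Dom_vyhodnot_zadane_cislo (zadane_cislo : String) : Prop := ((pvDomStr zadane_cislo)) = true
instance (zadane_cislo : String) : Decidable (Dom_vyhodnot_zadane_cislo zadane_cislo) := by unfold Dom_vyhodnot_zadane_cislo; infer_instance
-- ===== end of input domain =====

-- B replaces A's nested all-pairs index loops with a single pass that keeps a set of visited characters (idiomatic duplicate check).
-- isnumeric is ported as PySem.Str.strIsdigit: exact on the printable-ASCII domain (no non-ASCII numerics).


-- ===== PORT A =====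
-- A's double for-loop with early return: first duplicate pair found over index ranges.
def aDupSearch (cs : List Char) : Bool :=
  (PySem.List.pyRange 0 cs.length 1).any fun i =>
    (PySem.List.pyRange (i + 1) cs.length 1).any fun j =>
      PySem.List.pyGet? cs i == PySem.List.pyGet? cs j

def vyhodnot_zadane_cislo (zadane_cislo : String) : Bool × String :=
  if ¬ (PySem.Str.strIsdigit zadane_cislo = true) then (true, "Once more")
  else if PySem.Str.len zadane_cislo ≠ 4 then (true, "Number has wrong length")
  else if PySem.Str.pyGet? zadane_cislo 0 = some '0' then (true, "First number has not be 0.")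
  else if aDupSearch zadane_cislo.toList then (true, "Same numbers")
  else (false, "")

-- ===== PORT B =====
-- B's single pass with a set of visited characters.
def bScan : List Char → PySem.Set Char → Bool
  | [], _ => false
  | c :: rest, seen =>
      if PySem.Set.contains seen c then true else bScan rest (PySem.Set.add seen c)

def vyhodnot_zadane_cislo_alt (zadane_cislo : String) : Bool × String :=
  if ¬ (PySem.Str.strIsdigit zadane_cislo = true) then (true, "Once more")
  else if PySem.Str.len zadane_cislo ≠ 4 then (true, "Number has wrong length")
  else if PySem.Str.pyGet? zadane_cislo 0 = some '0' then (true, "First number has not be 0.")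
  else if bScan zadane_cislo.toList PySem.Set.empty then (true, "Same numbers")
  else (false, "")

-- ===== PRECONDITION & SPEC =====
def Spec_vyhodnot_zadane_cislo (zadane_cislo : String) (out : Bool × String) : Prop := out = vyhodnot_zadane_cislo_alt zadane_cislo
instance (zadane_cislo : String) (out : Bool × String) : Decidable (Spec_vyhodnot_zadane_cislo zadane_cislo out) := by unfold Spec_vyhodnot_zadane_cislo; infer_instance

-- ===== CLAIM (what is proved, stated in full; the proofs are below) =====
def Claim_equal_vyhodnot_zadane_cislo : Prop := ∀ (zadane_cislo : String), Dom_vyhodnot_zadane_cislo zadane_cislo → Spec_vyhodnot_zadane_cislo zadane_cislo (vyhodnot_zadane_cislo zadane_cislo)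

-- ===== LEMMAS AND PROOFS =====
-- On length-4 lists both duplicate detectors agree (decided per case on the six equalities).
theorem dup_agree (a b c d : Char) :
    aDupSearch [a, b, c, d] = bScan [a, b, c, d] PySem.Set.empty := by
  have r0 : PySem.List.pyRange 0 4 1 = [0, 1, 2, 3] := by decide
  have r1 : PySem.List.pyRange 1 4 1 = [1, 2, 3] := by decide
  have r2 : PySem.List.pyRange 2 4 1 = [2, 3] := by decide
  have r3 : PySem.List.pyRange 3 4 1 = [3] := by decide
  have r4 : PySem.List.pyRange 4 4 1 = [] := by decide
  have g0 : PySem.List.pyGet? [a, b, c, d] 0 = some a := rfl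
  have g1 : PySem.List.pyGet? [a, b, c, d] 1 = some b := rfl
  have g2 : PySem.List.pyGet? [a, b, c, d] 2 = some c := rfl
  have g3 : PySem.List.pyGet? [a, b, c, d] 3 = some d := rfl
  simp only [aDupSearch, List.length_cons, List.length_nil]
  norm_num [r0, r1, r2, r3, r4, List.any_cons, List.any_nil, g0, g1, g2, g3]
  simp only [bScan, PySem.Set.contains, PySem.Set.add]
  by_cases hab : a = b <;> by_cases hac : a = c <;> by_cases had : a = d <;>
    by_cases hbc : b = c <;> by_cases hbd : b = d <;> by_cases hcd : c = d <;>
    simp_all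
  simp [hab, hac, had, hbc, hbd, hcd,
    Ne.symm hab, Ne.symm hac, Ne.symm had, Ne.symm hbc, Ne.symm hbd, Ne.symm hcd]

theorem dup_agree' (cs : List Char) (h : cs.length = 4) :
    aDupSearch cs = bScan cs PySem.Set.empty := by
  match cs, h with
  | [a, b, c, d], _ => exact dup_agree a b c d

-- ===== VERDICT (by name: the statement is the Claim_ definition above) =====
theorem vyhodnot_zadane_cislo_spec : Claim_equal_vyhodnot_zadane_cislo := by
  intro z _
  unfold Spec_vyhodnot_zadane_cislo vyhodnot_zadane_cislo vyhodnot_zadane_cislo_alt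
  by_cases h2 : PySem.Str.len z = 4
  · have hlen : z.toList.length = 4 := by
      have : (z.length : Int) = 4 := by simpa [PySem.Str.len, PySem.Chars.len] using h2
      have hz : z.length = 4 := by exact_mod_cast this
      simpa using hz
    rw [dup_agree' z.toList hlen]
  · have h2' : ¬((z.length : Int) = 4) := by
      simpa [PySem.Str.len, PySem.Chars.len] using h2
    simp [h2']
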